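-- pv_equiv track=rewrite | github.com/Studio-tyx/EdgeRuler | edgeruler/evaluation/set_up.py | get_triggered_time
-- ===== SOURCE A (Python) =====
-- def get_triggered_time(data, target):
--     times = []
--     former = True
--     for line in data:
--         if former is False and line[1] >= target:
--             times.append(line[0])
--         if line[1] >= target:
--             former = True
--         else:
--             former = False
--     return times
-- ===== SOURCE B (Python) =====
-- def get_triggered_time(data, target):
--     # Stage 1: run-length encode the above/below-threshold signal,
--     # remembering each run's first timestamp.
--     runs = []
--     for time, value in data:
--         above = value >= target
--         if not runs or runs[-1][0] != above:
--             runs.append((above, time))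
--     # Stage 2: the first timestamp of every above-run, except the run
--     # that starts the data (a leading above-run is not a rising edge).
--     return [time for above, time in runs[1:] if above]
-- ===== Notes on version B (the rewrite author's own statement) =====
-- stated objective: alternative
-- what changed: Replaced the per-element 'former' state-flag loop with two staged passes: pass 1 run-length encodes the above/below signal into runs of (flag, first timestamp), pass 2 selects the first timestamp of every above-run except the one starting the data.
import Mathlib
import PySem

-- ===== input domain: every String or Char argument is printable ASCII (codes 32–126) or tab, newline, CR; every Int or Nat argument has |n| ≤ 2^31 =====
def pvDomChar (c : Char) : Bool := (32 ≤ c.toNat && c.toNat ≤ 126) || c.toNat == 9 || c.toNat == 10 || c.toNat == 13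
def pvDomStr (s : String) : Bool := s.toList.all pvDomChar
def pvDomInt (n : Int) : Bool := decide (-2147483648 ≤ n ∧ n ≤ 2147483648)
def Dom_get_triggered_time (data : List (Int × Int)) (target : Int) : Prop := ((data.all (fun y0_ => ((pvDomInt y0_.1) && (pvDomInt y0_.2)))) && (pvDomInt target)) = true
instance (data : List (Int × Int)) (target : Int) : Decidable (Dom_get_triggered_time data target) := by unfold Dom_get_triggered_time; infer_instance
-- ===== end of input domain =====

-- B replaces A's per-element 'former' state-flag loop by two staged passes: run-length
-- encode the above/below signal (keeping each run's first timestamp), then select the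
-- first timestamp of every above-run except the run that starts the data.

-- ===== PORT A =====
-- A's loop over data carrying (times, former); appends line[0] when former=false ∧ line[1] ≥ target
def pvLoopA (target : Int) : List (Int × Int) → Bool → List Int → List Int
  | [], _, times => times
  | line :: rest, former, times =>
      pvLoopA target rest (decide (line.2 ≥ target))
        (if former = false ∧ line.2 ≥ target then times ++ [line.1] else times)

def get_triggered_time (data : List (Int × Int)) (target : Int) : List Int :=
  pvLoopA target data true []

-- ===== PORT B =====
-- Stage 1 of Source B: the fold building 'runs', appending (above, time) when runs is empty
-- or the last run's flag differs
def pvRunsFold (target : Int) (data : List (Int × Int)) : List (Bool × Int) :=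
  data.foldl
    (fun runs p =>
      let above := decide (p.2 ≥ target)
      if (runs.getLast?.map Prod.fst) ≠ some above then runs ++ [(above, p.1)] else runs)
    []

-- Stage 2 of Source B: the comprehension over runs[1:] keeping times of above-runs
def get_triggered_time_alt (data : List (Int × Int)) (target : Int) : List Int :=
  ((pvRunsFold target data).drop 1).filterMap
    (fun r => if r.1 then some r.2 else none)

-- ===== PRECONDITION & SPEC =====
def Spec_get_triggered_time (data : List (Int × Int)) (target : Int) (out : List Int) : Prop := out = get_triggered_time_alt data target
instance (data : List (Int × Int)) (target : Int) (out : List Int) : Decidable (Spec_get_triggered_time data target out) := by unfold Spec_get_triggered_time; infer_instance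

-- ===== CLAIM (what is proved, stated in full; the proofs are below) =====
def Claim_equal_get_triggered_time : Prop := ∀ (data : List (Int × Int)) (target : Int), Dom_get_triggered_time data target → Spec_get_triggered_time data target (get_triggered_time data target)

-- ===== LEMMAS AND PROOFS =====

-- A's loop output without the accumulator
def pvF (target : Int) : List (Int × Int) → Bool → List Int
  | [], _ => []
  | line :: rest, former =>
      (if former = false ∧ line.2 ≥ target then [line.1] else []) ++
        pvF target rest (decide (line.2 ≥ target))

theorem pvLoopA_eq (target : Int) (xs : List (Int × Int)) :
    ∀ former times, pvLoopA target xs former times = times ++ pvF target xs former := by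
  induction xs with
  | nil => intro f t; simp [pvLoopA, pvF]
  | cons x rest ih =>
      intro f t
      simp only [pvLoopA, pvF, ih]
      split_ifs <;> simp

-- recursive characterisation of the RLE pass, carrying the previous run's flag
def pvRunsRec (target : Int) : Option Bool → List (Int × Int) → List (Bool × Int)
  | _, [] => []
  | prev, p :: rest =>
      let above := decide (p.2 ≥ target)
      if prev ≠ some above then (above, p.1) :: pvRunsRec target (some above) rest
      else pvRunsRec target (some above) rest

theorem pvRunsFold_eq (target : Int) (xs : List (Int × Int)) :
    ∀ acc, List.foldl
      (fun runs p =>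
        let above := decide (p.2 ≥ target)
        if (runs.getLast?.map Prod.fst) ≠ some above then runs ++ [(above, p.1)] else runs)
      acc xs = acc ++ pvRunsRec target (acc.getLast?.map Prod.fst) xs := by
  induction xs with
  | nil => intro acc; simp [pvRunsRec]
  | cons p rest ih =>
      intro acc
      simp only [List.foldl_cons, pvRunsRec]
      by_cases h : (acc.getLast?.map Prod.fst) = some (decide (p.2 ≥ target))
      · rw [if_neg (by simp [h]), if_neg (by simp [h]), ih, h]
      · rw [if_pos h, if_pos h, ih]
        simp [List.getLast?_append]

def pvPick (rs : List (Bool × Int)) : List Int :=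
  rs.filterMap (fun r => if r.1 then some r.2 else none)

-- A's residual loop equals picking above-runs from the RLE with previous flag = former
theorem pvF_runs (target : Int) (xs : List (Int × Int)) :
    ∀ b : Bool, pvF target xs b = pvPick (pvRunsRec target (some b) xs) := by
  induction xs with
  | nil => intro b; simp [pvF, pvRunsRec, pvPick]
  | cons p rest ih =>
      intro b
      simp only [pvF, pvRunsRec]
      by_cases ha : p.2 ≥ target
      · cases b with
        | false => simp [pvPick, ha, ih]
        | true => simp [pvPick, ha, ih]
      · cases b with
        | false => simp [pvPick, ha, ih]
        | true => simp [pvPick, ha, ih]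

-- dropping the first run of the prev-free RLE = RLE with phantom previous 'above' flag, under pick
theorem pvDrop_runs (target : Int) (xs : List (Int × Int)) :
    pvPick ((pvRunsRec target none xs).drop 1) = pvPick (pvRunsRec target (some true) xs) := by
  cases xs with
  | nil => simp [pvRunsRec]
  | cons p rest =>
      simp only [pvRunsRec]
      by_cases ha : p.2 ≥ target
      · simp [ha]
      · simp [pvPick, ha]

-- ===== VERDICT (by name: the statement is the Claim_ definition above) =====
theorem get_triggered_time_spec : Claim_equal_get_triggered_time := by
  intro data target _
  unfold Spec_get_triggered_time get_triggered_time get_triggered_time_alt pvRunsFold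
  rw [pvLoopA_eq, pvRunsFold_eq]
  simp only [List.nil_append, List.getLast?_nil, Option.map_none]
  rw [pvF_runs]
  exact (pvDrop_runs target data).symm
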